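-- pv_equiv track=rewrite | github.com/AnnaGalakhova/GRM3 | All_data_analysis.py | find_correct_file
-- ===== SOURCE A (Python) =====
-- def find_correct_file(cell, all_files):
--     """
--     Finds the correct file from a list of files based on a given 'cell' name.
--
--     Arguments:
--     cell -- The target cell string (e.g., 'H24.29.268.11.61.01')
--     all_files -- List of filenames to search through
--
--     Returns:
--     correct_file -- The filename that matches the 'cell' pattern best, or None if no match is found
--     """
--     # First, look for an exact match (including .nwb)
--     exact_matches = [f for f in all_files if f.startswith(cell)]
--
--     if exact_matches:
--         return exact_matches[0]  # Return the first exact match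
--
--     # If no exact match, use partial matching as a fallback
--     partial_matches = [f for f in all_files if cell[:17] in f and cell[17:] in f[17:-4]]  # Match without .nwb
--     if partial_matches:
--         return partial_matches[0]  # Return the first partial match
--
--     return None
-- ===== SOURCE B (Python) =====
-- def find_correct_file(cell, all_files):
--     # Single early-exiting pass: an exact (startswith) match returns immediately;
--     # the first partial match is remembered and returned only if no exact match exists.
--     first_partial = None
--     for f in all_files:
--         if f.startswith(cell):
--             return f
--         if first_partial is None and cell[:17] in f and cell[17:] in f[17:-4]:
--             first_partial = f
--     return first_partial
-- ===== Notes on version B (the rewrite author's own statement) =====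
-- stated objective: alternative
-- what changed: Replaces A's two full list-comprehension scans with one early-exiting loop that returns on the first exact match and remembers the first partial match.
import Mathlib
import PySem

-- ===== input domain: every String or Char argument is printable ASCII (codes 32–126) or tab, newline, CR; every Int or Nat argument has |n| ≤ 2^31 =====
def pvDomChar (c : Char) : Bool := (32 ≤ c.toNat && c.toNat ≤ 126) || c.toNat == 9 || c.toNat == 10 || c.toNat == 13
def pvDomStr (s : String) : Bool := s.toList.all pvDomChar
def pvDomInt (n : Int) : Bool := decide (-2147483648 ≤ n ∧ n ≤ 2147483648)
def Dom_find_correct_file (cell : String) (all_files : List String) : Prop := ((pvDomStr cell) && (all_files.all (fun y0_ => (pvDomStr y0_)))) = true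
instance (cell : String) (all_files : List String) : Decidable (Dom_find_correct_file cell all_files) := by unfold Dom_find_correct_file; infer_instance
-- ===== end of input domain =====

-- B replaces A's two full filter passes with one early-exiting loop that keeps the first partial match (alternative decomposition, same cost).


-- ===== PORT A =====
-- shared literal translation of the partial-match predicate: cell[:17] in f and cell[17:] in f[17:-4]
def pvPartial (cell f : String) : Bool :=
  PySem.Str.isIn (PySem.Str.slice cell none (some 17)) f &&
  PySem.Str.isIn (PySem.Str.slice cell (some 17) none) (PySem.Str.slice f (some 17) (some (-4)))

def find_correct_file (cell : String) (all_files : List String) : Option String :=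
  let exact_matches := all_files.filter (fun f => PySem.Str.startswith f cell)
  match exact_matches with
  | e :: _ => some e
  | [] =>
    let partial_matches := all_files.filter (fun f => pvPartial cell f)
    match partial_matches with
    | p :: _ => some p
    | [] => none

-- ===== PORT B =====
-- single pass carrying first_partial; return immediately on an exact match
def pvFindLoop (cell : String) (fp : Option String) : List String → Option String
  | [] => fp
  | f :: rest =>
    if PySem.Str.startswith f cell then some f
    else pvFindLoop cell (if fp.isNone && pvPartial cell f then some f else fp) rest

def find_correct_file_alt (cell : String) (all_files : List String) : Option String :=
  pvFindLoop cell none all_files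

-- ===== PRECONDITION & SPEC =====
def Spec_find_correct_file (cell : String) (all_files : List String) (out : Option String) : Prop := out = find_correct_file_alt cell all_files
instance (cell : String) (all_files : List String) (out : Option String) : Decidable (Spec_find_correct_file cell all_files out) := by unfold Spec_find_correct_file; infer_instance

-- ===== CLAIM (what is proved, stated in full; the proofs are below) =====
def Claim_equal_find_correct_file : Prop := ∀ (cell : String) (all_files : List String), Dom_find_correct_file cell all_files → Spec_find_correct_file cell all_files (find_correct_file cell all_files)

-- ===== LEMMAS AND PROOFS =====

-- ===== VERDICT (by name: the statement is the Claim_ definition above) =====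
lemma pvFindLoop_eq (cell : String) : ∀ (fs : List String) (fp : Option String),
    pvFindLoop cell fp fs =
      match fs.filter (fun f => PySem.Str.startswith f cell) with
      | e :: _ => some e
      | [] => fp.orElse (fun _ => (fs.filter (fun f => pvPartial cell f)).head?)
  | [], fp => by cases fp <;> simp [pvFindLoop, Option.orElse]
  | f :: rest, fp => by
    simp only [pvFindLoop, List.filter_cons]
    by_cases hs : PySem.Chars.startswith f.toList cell.toList
    · simp [PySem.Str.startswith_eq, hs]
    · simp only [PySem.Str.startswith_eq, hs, if_false, Bool.false_eq_true]
      rw [pvFindLoop_eq cell rest]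
      by_cases hp : pvPartial cell f
      · cases fp <;> simp [hp, Option.orElse]
      · cases fp <;> simp [hp, Option.orElse]

theorem find_correct_file_spec : Claim_equal_find_correct_file := by
  intro cell all_files _
  unfold Spec_find_correct_file find_correct_file find_correct_file_alt
  rw [pvFindLoop_eq]
  cases all_files.filter (fun f => PySem.Str.startswith f cell) with
  | cons e t => simp
  | nil =>
    simp only [Option.orElse]
    cases all_files.filter (fun f => pvPartial cell f) <;> simp
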